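-- pv_equiv track=rewrite | github.com/Alexander-Benesch/Gitea-Agent | samuel/slices/implementation/context_builder.py | _resolve_module_info
-- ===== SOURCE A (Python) =====
-- def _path_matches_module(pattern: str, file_path: str) -> bool:
--     if pattern.endswith("/"):
--         return file_path.startswith(pattern)
--     return file_path == pattern or file_path.startswith(pattern + "/")
--
-- def _resolve_module_info(files: list[str], modules: list[dict]) -> list[dict]:
--     result: list[dict] = []
--     seen_paths: set[str] = set()
--     for mod in modules:
--         mod_path = mod.get("path", "")
--         if not mod_path or mod_path in seen_paths:
--             continue
--         if any(_path_matches_module(mod_path, f) for f in files):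
--             result.append(mod)
--             seen_paths.add(mod_path)
--     return result
-- ===== SOURCE B (Python) =====
-- def _resolve_module_info(files: list[str], modules: list[dict]) -> list[dict]:
--     # Index the files once: the set of files themselves, and the set of all
--     # their prefixes that end in "/". Each module test is then set lookups.
--     exact = set(files)
--     dir_prefixes = set()
--     for f in files:
--         for i, ch in enumerate(f):
--             if ch == "/":
--                 dir_prefixes.add(f[: i + 1])
--     result = []
--     seen = set()
--     for mod in modules:
--         p = mod.get("path", "")
--         if not p or p in seen:
--             continue
--         if p.endswith("/"):
--             ok = p in dir_prefixes
--         else: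
--             ok = p in exact or p + "/" in dir_prefixes
--         if ok:
--             result.append(mod)
--             seen.add(p)
--     return result
-- ===== Notes on version B (the rewrite author's own statement) =====
-- stated objective: alternative
-- what changed: Instead of testing every module pattern against every file with a per-pair prefix scan, B indexes the files once into a set of exact paths and a set of all slash-terminated prefixes, and each module test becomes set membership lookups.
import Mathlib
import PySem

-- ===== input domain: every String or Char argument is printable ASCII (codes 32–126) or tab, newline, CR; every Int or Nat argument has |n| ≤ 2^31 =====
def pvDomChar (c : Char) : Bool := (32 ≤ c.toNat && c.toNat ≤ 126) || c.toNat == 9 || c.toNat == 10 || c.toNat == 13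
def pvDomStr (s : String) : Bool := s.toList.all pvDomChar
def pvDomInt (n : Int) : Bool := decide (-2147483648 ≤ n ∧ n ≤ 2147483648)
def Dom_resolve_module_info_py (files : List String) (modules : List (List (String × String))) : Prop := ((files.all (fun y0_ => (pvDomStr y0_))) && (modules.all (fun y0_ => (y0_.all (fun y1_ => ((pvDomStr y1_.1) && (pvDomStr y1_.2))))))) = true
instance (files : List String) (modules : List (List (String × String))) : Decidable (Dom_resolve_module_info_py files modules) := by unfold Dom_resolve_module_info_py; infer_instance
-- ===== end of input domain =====

-- B indexes the files once (a set of exact paths and a set of all slash-terminated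
-- prefixes) so each module test is set lookups instead of a scan over all files.


-- ===== PORT A =====
-- mod.get("path", "") on the association list (first matching key, Python dict lookup)
def pyGetPath (mod : List (String × String)) : String :=
  match mod.find? (fun kv => kv.1 == "path") with
  | some kv => kv.2
  | none => ""

def pathMatchesModule (pattern file_path : String) : Bool :=
  if PySem.Str.endswith pattern "/" then
    PySem.Str.startswith file_path pattern
  else
    file_path == pattern || PySem.Str.startswith file_path (pattern ++ "/")

def stepA (files : List String) (st : List (List (String × String)) × PySem.Set String)
    (mod : List (String × String)) : List (List (String × String)) × PySem.Set String :=
  let mod_path := pyGetPath mod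
  if mod_path == "" || PySem.Set.contains st.2 mod_path then st
  else if files.any (fun f => pathMatchesModule mod_path f) then
    (st.1 ++ [mod], PySem.Set.add st.2 mod_path)
  else st

def resolve_module_info_py (files : List String) (modules : List (List (String × String))) : List (List (String × String)) :=
  (modules.foldl (stepA files) ([], PySem.Set.empty)).1

-- ===== PORT B =====
-- the set { f[:i+1] | f ∈ files, f[i] = '/' } of all slash-terminated prefixes
def dirPrefixes (files : List String) : PySem.Set String :=
  files.foldl
    (fun s f =>
      (PySem.List.enumerate f.toList 0).foldl
        (fun s2 ic =>
          if ic.2 == '/' then PySem.Set.add s2 (PySem.Str.slice f none (some (ic.1 + 1))) else s2)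
        s)
    PySem.Set.empty

def stepB (exact dp : PySem.Set String) (st : List (List (String × String)) × PySem.Set String)
    (mod : List (String × String)) : List (List (String × String)) × PySem.Set String :=
  let p := pyGetPath mod
  if p == "" || PySem.Set.contains st.2 p then st
  else
    let ok := if PySem.Str.endswith p "/" then PySem.Set.contains dp p
              else PySem.Set.contains exact p || PySem.Set.contains dp (p ++ "/")
    if ok then (st.1 ++ [mod], PySem.Set.add st.2 p) else st

def resolve_module_info_py_alt (files : List String) (modules : List (List (String × String))) : List (List (String × String)) :=
  (modules.foldl (stepB (PySem.Set.ofList files) (dirPrefixes files)) ([], PySem.Set.empty)).1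

-- ===== PRECONDITION & SPEC =====
def Spec_resolve_module_info_py (files : List String) (modules : List (List (String × String))) (out : List (List (String × String))) : Prop := out = resolve_module_info_py_alt files modules
instance (files : List String) (modules : List (List (String × String))) (out : List (List (String × String))) : Decidable (Spec_resolve_module_info_py files modules out) := by unfold Spec_resolve_module_info_py; infer_instance

-- ===== CLAIM (what is proved, stated in full; the proofs are below) =====
def Claim_equal_resolve_module_info_py : Prop := ∀ (files : List String) (modules : List (List (String × String))), Dom_resolve_module_info_py files modules → Spec_resolve_module_info_py files modules (resolve_module_info_py files modules)

-- ===== LEMMAS AND PROOFS =====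

-- membership in the inner fold over one file's characters
theorem mem_innerFold (f : String) (l : List (Int × Char)) (s : PySem.Set String) (q : String) :
    (q ∈ l.foldl (fun s2 ic => if ic.2 == '/' then PySem.Set.add s2 (PySem.Str.slice f none (some (ic.1 + 1))) else s2) s)
      ↔ q ∈ s ∨ ∃ ic ∈ l, ic.2 = '/' ∧ q = PySem.Str.slice f none (some (ic.1 + 1)) := by
  induction l generalizing s with
  | nil => simp
  | cons ic t ih =>
    simp only [List.foldl_cons, ih, List.mem_cons]
    by_cases h : ic.2 = '/'
    · simp [h, PySem.Set.mem_add]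
      try tauto
    · simp [h]
      try tauto

theorem mem_dirPrefixes (files : List String) (q : String) :
    q ∈ dirPrefixes files ↔
      ∃ f ∈ files, ∃ k : Nat, ∃ h : k < f.toList.length,
        f.toList[k] = '/' ∧ q = PySem.Str.slice f none (some ((k : Int) + 1)) := by
  unfold dirPrefixes
  suffices H : ∀ (fs : List String) (s : PySem.Set String),
      (q ∈ fs.foldl (fun s f => (PySem.List.enumerate f.toList 0).foldl
          (fun s2 ic => if ic.2 == '/' then PySem.Set.add s2 (PySem.Str.slice f none (some (ic.1 + 1))) else s2) s) s)
        ↔ q ∈ s ∨ ∃ f ∈ fs, ∃ k : Nat, ∃ h : k < f.toList.length,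
            f.toList[k] = '/' ∧ q = PySem.Str.slice f none (some ((k : Int) + 1)) by
    rw [H]; simp [PySem.Set.empty]
  intro fs
  induction fs with
  | nil => simp
  | cons f t ih =>
    intro s
    simp only [List.foldl_cons, ih, mem_innerFold, List.mem_cons]
    constructor
    · rintro (((hs | h) | h))
      · exact Or.inl hs
      · obtain ⟨ic, hic, hslash, hq⟩ := h
        rw [PySem.List.mem_enumerate_iff] at hic
        obtain ⟨k, hk, rfl⟩ := hic
        exact Or.inr ⟨f, Or.inl rfl, k, hk, by simpa using hslash, by simpa using hq⟩
      · obtain ⟨g, hg, hrest⟩ := h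
        exact Or.inr ⟨g, Or.inr hg, hrest⟩
    · rintro (hs | ⟨g, (rfl | hg), k, hk, hslash, hq⟩)
      · exact Or.inl (Or.inl hs)
      · refine Or.inl (Or.inr ⟨((k : Int), g.toList[k]), ?_, by simpa using hslash, by simpa using hq⟩)
        rw [PySem.List.mem_enumerate_iff]
        exact ⟨k, hk, by simp⟩
      · exact Or.inr ⟨g, hg, k, hk, hslash, hq⟩

theorem toList_sliceTake (f : String) (k : Nat) :
    (PySem.Str.slice f none (some ((k : Int) + 1))).toList = f.toList.take (k + 1) := by
  rw [PySem.Str.toList_slice]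
  simp only [PySem.Chars.slice_eq_listSlice]
  have h := PySem.List.slice_to_natCast f.toList (k + 1)
  push_cast at h
  exact h

-- the dirPrefixes set decides "some file starts with q" for slash-terminated q
theorem contains_dirPrefixes (files : List String) (q : String)
    (hq : PySem.Str.endswith q "/" = true) :
    PySem.Set.contains (dirPrefixes files) q = files.any (fun f => PySem.Str.startswith f q) := by
  have hsuf : ['/'] <:+ q.toList := by
    rw [PySem.Str.endswith_eq] at hq
    have := (PySem.Chars.endswith_iff q.toList ("/").toList).mp hq
    simpa using this
  obtain ⟨t, ht⟩ := hsuf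
  rw [Bool.eq_iff_iff]
  constructor
  · intro hc
    rw [PySem.Set.contains_iff, mem_dirPrefixes] at hc
    obtain ⟨f, hf, k, hk, hsl, hq2⟩ := hc
    rw [List.any_eq_true]
    refine ⟨f, hf, ?_⟩
    rw [PySem.Str.startswith_eq]
    rw [PySem.Chars.startswith_iff]
    have : q.toList = f.toList.take (k + 1) := by rw [hq2, toList_sliceTake]
    rw [this]
    exact List.take_prefix _ _
  · intro hAny
    rw [List.any_eq_true] at hAny
    obtain ⟨f, hf, hsw⟩ := hAny
    rw [PySem.Str.startswith_eq] at hsw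
    have hpre : q.toList <+: f.toList := (PySem.Chars.startswith_iff _ _).mp hsw
    have hqlen : q.toList.length = t.length + 1 := by rw [← ht]; simp
    have hlen : q.toList.length ≤ f.toList.length := hpre.length_le
    have hkf : t.length < f.toList.length := by omega
    rw [PySem.Set.contains_iff, mem_dirPrefixes]
    refine ⟨f, hf, t.length, hkf, ?_, ?_⟩
    · have hkq : t.length < q.toList.length := by omega
      have h1 : f.toList[t.length] = q.toList[t.length] := (List.IsPrefix.getElem hpre hkq).symm
      rw [h1, List.getElem_of_eq ht.symm hkq]
      simp
    · rw [← String.toList_inj, toList_sliceTake]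
      have := List.prefix_iff_eq_take.mp hpre
      rw [hqlen] at this
      exact this

theorem any_or_split {α : Type} (l : List α) (f g : α → Bool) :
    (l.any fun x => f x || g x) = (l.any f || l.any g) := by
  induction l with
  | nil => simp
  | cons x t ih => simp [ih]; cases f x <;> cases g x <;> simp

theorem contains_ofList_eq_any (files : List String) (p : String) :
    PySem.Set.contains (PySem.Set.ofList files) p = files.any (fun f => f == p) := by
  rw [Bool.eq_iff_iff, PySem.Set.contains_iff, PySem.Set.mem_ofList, List.any_eq_true]
  constructor
  · intro h; exact ⟨p, h, by simp⟩
  · rintro ⟨f, hf, hfp⟩; rw [beq_iff_eq] at hfp; rwa [← hfp]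

theorem endswith_append_slash (p : String) : PySem.Str.endswith (p ++ "/") "/" = true := by
  rw [PySem.Str.endswith_eq, PySem.Chars.endswith_iff]
  simp

theorem any_match_eq (files : List String) (p : String) :
    files.any (fun f => pathMatchesModule p f) =
      (if PySem.Str.endswith p "/" then PySem.Set.contains (dirPrefixes files) p
       else PySem.Set.contains (PySem.Set.ofList files) p
            || PySem.Set.contains (dirPrefixes files) (p ++ "/")) := by
  by_cases h : PySem.Str.endswith p "/" = true
  · simp only [pathMatchesModule, h, if_true]
    exact (contains_dirPrefixes files p h).symm
  · rw [Bool.not_eq_true] at h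
    simp only [pathMatchesModule, h, Bool.false_eq_true, if_false]
    rw [any_or_split, contains_ofList_eq_any,
      contains_dirPrefixes files (p ++ "/") (endswith_append_slash p)]

-- ===== VERDICT (by name: the statement is the Claim_ definition above) =====
theorem resolve_module_info_py_spec : Claim_equal_resolve_module_info_py := by
  intro files modules _
  unfold Spec_resolve_module_info_py resolve_module_info_py resolve_module_info_py_alt
  have hstep : stepA files = stepB (PySem.Set.ofList files) (dirPrefixes files) := by
    funext st mod
    simp only [stepA, stepB, any_match_eq]
  rw [hstep]
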